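-- pv_equiv track=rewrite | github.com/domyg/Information-Theory-and-Data-Compression | Script Python/SardinasPatterson.py | create_set_n
-- ===== SOURCE A (Python) =====
-- def create_set_n(code, n):
--     if n == 0:
--         return set(code)
--
--     else:
--         set_n = set()
--
--         # Poichè S_n è creato a patire da S_0 ed S_n-1, chiamo ricorsivamente la funzione per creare
--         # il set precedente
--         previous_set = create_set_n(code, n-1)
--
--         # Per ogni codeword dell'insieme S_0 verifico se esiste una word nell'insieme S_n-1 tale per cui
--         # questa è un prefisso della suddetta codeword.
--         # Se ciò accade, aggiungo all'insieme S_n la word w tale per cui a = bw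
--         for a in code:
--             for b in previous_set:
--
--                 # Attraverso la funzione find verifico che venga trovato, all'interno di 'a',
--                 # il pattern composto dalla stringa 'b' e che questo cominci proprio alla
--                 # prima posizione della word 'a'; ovvero, verifico che 'b' sia prefisso di tutta la
--                 # stringa 'a'.
--                 if (len(a) > len(b) and a.find(b) == 0):
--
--                     # Aggiungo a S_n la parte della word 'a' che comincia a partire dalla posizione
--                     # successiva all'ultimo simbolo della word 'b'
--                     set_n.add(a[len(b):])
--
--         # Per ogni word dell'insieme S_n-1 verifico se esiste una codeword nell'insieme S_0 tale per cui
--         # questa è un suo suffisso; ovvero, verifico se la codeword è un prefisso per la word di S_n-1.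
--         # Se ciò accade, aggiungo all'insieme S_n la word w tale per cui b = aw
--         for b in previous_set:
--             for a in code:
--                 if(len(b) > len(a) and b.find(a) == 0):
--
--                     # Aggiungo a S_n la parte della word 'b' che comincia a partire dalla posizione
--                     # successiva all'ultimo simbolo della word 'a'
--                     set_n.add(b[len(a):])
--
--         return set_n
-- ===== SOURCE B (Python) =====
-- def _residuals(xs, ys):
--     # dangling suffixes: y a proper prefix of x contributes x without that prefix
--     return [x.removeprefix(y) for x in xs for y in ys if x != y and x.startswith(y)]
--
--
-- def create_set_n(code, n):
--     current = set(code)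
--     for _ in range(n):
--         current = set(_residuals(code, current) + _residuals(current, code))
--     return current
-- ===== Notes on version B (the rewrite author's own statement) =====
-- stated objective: idiomatic
-- what changed: The recursion on n is replaced by a bottom-up loop, and the two hand-written nested loops with len/find guards are replaced by one shared helper that lists dangling suffixes with str.startswith/str.removeprefix comprehensions and is applied symmetrically.
import Mathlib
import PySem

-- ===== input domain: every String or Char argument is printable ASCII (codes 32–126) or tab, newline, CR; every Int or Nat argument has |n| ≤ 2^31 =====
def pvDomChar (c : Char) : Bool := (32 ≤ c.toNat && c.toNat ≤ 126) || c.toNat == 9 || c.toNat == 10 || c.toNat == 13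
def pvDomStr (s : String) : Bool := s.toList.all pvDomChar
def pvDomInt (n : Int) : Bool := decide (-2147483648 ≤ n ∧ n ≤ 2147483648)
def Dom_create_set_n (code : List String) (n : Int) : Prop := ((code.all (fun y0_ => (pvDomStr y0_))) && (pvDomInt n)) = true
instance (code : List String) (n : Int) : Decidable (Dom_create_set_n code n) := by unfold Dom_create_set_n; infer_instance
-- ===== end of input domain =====

-- B replaces A's recursion on n by a bottom-up loop and A's two nested len/find loops by one
-- shared startswith/removeprefix comprehension helper applied symmetrically (idiomatic; same cost).

-- ===== PORT A =====
-- literal recursion of A, on fuel n.toNat (Pre_ restricts to n ≥ 0, where this is exact)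
def create_set_nA (code : List String) : Nat → PySem.Set String
  | 0 => PySem.Set.ofList code
  | Nat.succ k =>
      let previous_set := create_set_nA code k
      let set_n : PySem.Set String :=
        code.foldl (fun sn a =>
          previous_set.foldl (fun sn b =>
            if PySem.Str.len a > PySem.Str.len b ∧ PySem.Str.find a b = 0 then
              PySem.Set.add sn (PySem.Str.slice a (some (PySem.Str.len b)) none)
            else sn) sn) PySem.Set.empty
      previous_set.foldl (fun sn b =>
        code.foldl (fun sn a =>
          if PySem.Str.len b > PySem.Str.len a ∧ PySem.Str.find b a = 0 then
            PySem.Set.add sn (PySem.Str.slice b (some (PySem.Str.len a)) none)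
          else sn) sn) set_n

def create_set_n (code : List String) (n : Int) : List String :=
  create_set_nA code n.toNat

-- ===== PORT B =====
-- x.removeprefix(y): drop y if it is a prefix of x, else x unchanged (exact port of str.removeprefix)
def pyRemoveprefix (x y : String) : String :=
  if PySem.Str.startswith x y then String.ofList (x.toList.drop y.toList.length) else x

-- [x.removeprefix(y) for x in xs for y in ys if x != y and x.startswith(y)]
def residuals (xs ys : List String) : List String :=
  xs.flatMap (fun x => ys.filterMap (fun y =>
    if x ≠ y ∧ PySem.Str.startswith x y = true then some (pyRemoveprefix x y) else none))

def create_set_n_alt (code : List String) (n : Int) : List String :=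
  (List.range n.toNat).foldl
    (fun current _ => PySem.Set.ofList (residuals code current ++ residuals current code))
    (PySem.Set.ofList code)

-- ===== PRECONDITION & SPEC =====
-- Pre_ excludes n < 0, where A's unbounded recursion raises RecursionError.
def Pre_create_set_n (code : List String) (n : Int) : Prop := 0 ≤ n
instance (code : List String) (n : Int) : Decidable (Pre_create_set_n code n) := by unfold Pre_create_set_n; infer_instance
def pvWitness_create_set_n : List String × Int := (["0", "01", "011"], 2)

def Spec_create_set_n (code : List String) (n : Int) (out : List String) : Prop := out = create_set_n_alt code n
instance (code : List String) (n : Int) (out : List String) : Decidable (Spec_create_set_n code n out) := by unfold Spec_create_set_n; infer_instance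

-- ===== CLAIM (what is proved, stated in full; the proofs are below) =====
def Claim_equal_create_set_n : Prop := ∀ (code : List String) (n : Int), Dom_create_set_n code n → Pre_create_set_n code n → Spec_create_set_n code n (create_set_n code n)
-- ===== LEMMAS AND PROOFS =====

-- find s sub = 0 exactly when sub is a prefix of s
theorem find_eq_zero_iff (s sub : List Char) :
    PySem.Chars.find s sub = 0 ↔ sub <+: s := by
  constructor
  · intro h
    have hs := PySem.Chars.find_spec (s := s) (sub := sub) (by omega)
    simpa [h] using hs.1
  · intro hp
    have h0 : 0 ≤ PySem.Chars.find s sub :=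
      (PySem.Chars.find_nonneg_iff s sub).mpr hp.isInfix
    by_contra hne
    have hpos : 0 < (PySem.Chars.find s sub).toNat := by omega
    exact ((PySem.Chars.find_spec h0).2 0 hpos) (by simpa using hp)

-- two equal toLists give equal strings
theorem str_eq_of_toList (a b : String) (h : a.toList = b.toList) : a = b := by
  have := congrArg String.ofList h
  simpa using this

-- A's guard equals B's guard
theorem guard_iff (a b : String) :
    (PySem.Str.len a > PySem.Str.len b ∧ PySem.Str.find a b = 0)
      ↔ (a ≠ b ∧ PySem.Str.startswith a b = true) := by
  have hsw : PySem.Str.startswith a b = true ↔ b.toList <+: a.toList := by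
    simp [PySem.Chars.startswith_iff]
  have hfind : PySem.Str.find a b = 0 ↔ b.toList <+: a.toList := by
    simp [find_eq_zero_iff]
  have hlen : PySem.Str.len a > PySem.Str.len b ↔ b.toList.length < a.toList.length := by
    simp
  constructor
  · rintro ⟨hl, hf⟩
    have hp := hfind.mp hf
    refine ⟨fun he => ?_, hsw.mpr hp⟩
    subst he
    exact lt_irrefl _ (hlen.mp hl)
  · rintro ⟨hne, hs⟩
    have hp := hsw.mp hs
    refine ⟨hlen.mpr ?_, hfind.mpr hp⟩
    rcases lt_or_eq_of_le hp.length_le with h | h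
    · exact h
    · exact absurd (str_eq_of_toList b a (hp.eq_of_length h)) (fun e => hne e.symm)

-- A's slice equals B's removeprefix when the guard holds
theorem slice_eq_removeprefix (a b : String) (hs : PySem.Str.startswith a b = true) :
    PySem.Str.slice a (some (PySem.Str.len b)) none = pyRemoveprefix a b := by
  have hs' : PySem.Chars.startswith a.toList b.toList = true := by simpa using hs
  apply str_eq_of_toList
  simp [pyRemoveprefix, hs', PySem.Str.toList_slice, PySem.List.slice_from_natCast]

-- A's conditional-add loop is the fold of Set.add over the filtered images
theorem foldl_add_if (l : List String) (p : String → Prop) [DecidablePred p]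
    (f : String → String) (s : PySem.Set String) :
    l.foldl (fun s b => if p b then PySem.Set.add s (f b) else s) s
      = (l.filterMap (fun b => if p b then some (f b) else none)).foldl PySem.Set.add s := by
  induction l generalizing s with
  | nil => rfl
  | cons x xs ih =>
      by_cases h : p x <;> simp [List.foldl_cons, h, ih]

-- A's filtered images at level word a are B's residual candidates for a
theorem inner_eq (a : String) (ys : List String) :
    (ys.filterMap (fun b =>
        if PySem.Str.len a > PySem.Str.len b ∧ PySem.Str.find a b = 0 then
          some (PySem.Str.slice a (some (PySem.Str.len b)) none)
        else none))
      = ys.filterMap (fun b =>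
          if a ≠ b ∧ PySem.Str.startswith a b = true then some (pyRemoveprefix a b) else none) := by
  apply List.filterMap_congr
  intro b _
  by_cases h : PySem.Str.len a > PySem.Str.len b ∧ PySem.Str.find a b = 0
  · have h' := (guard_iff a b).mp h
    rw [if_pos h, if_pos h', slice_eq_removeprefix a b h'.2]
  · have h' : ¬ (a ≠ b ∧ PySem.Str.startswith a b = true) := fun hc => h ((guard_iff a b).mpr hc)
    rw [if_neg h, if_neg h']

theorem residuals_cons (x : String) (t ys : List String) :
    residuals (x :: t) ys
      = ys.filterMap (fun y =>
          if x ≠ y ∧ PySem.Str.startswith x y = true then some (pyRemoveprefix x y) else none)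
        ++ residuals t ys := by
  simp [residuals]

-- one half of A's level-k+1 body is B's residuals list, folded in
theorem half_eq (xs ys : List String) (s : PySem.Set String) :
    xs.foldl (fun sn a =>
        ys.foldl (fun sn b =>
          if PySem.Str.len a > PySem.Str.len b ∧ PySem.Str.find a b = 0 then
            PySem.Set.add sn (PySem.Str.slice a (some (PySem.Str.len b)) none)
          else sn) sn) s
      = (residuals xs ys).foldl PySem.Set.add s := by
  induction xs generalizing s with
  | nil => rfl
  | cons x t ih =>
      rw [List.foldl_cons, ih, residuals_cons, List.foldl_append,
        foldl_add_if ys (fun b => PySem.Str.len x > PySem.Str.len b ∧ PySem.Str.find x b = 0),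
        inner_eq]

-- one level of A equals one step of B's loop
theorem stepA_eq (code : List String) (k : Nat) :
    create_set_nA code (k + 1)
      = PySem.Set.ofList (residuals code (create_set_nA code k)
          ++ residuals (create_set_nA code k) code) := by
  simp only [create_set_nA, half_eq, PySem.Set.ofList_eq_foldl, List.foldl_append, PySem.Set.empty]

theorem levels_eq (code : List String) (k : Nat) :
    create_set_nA code k
      = (List.range k).foldl
          (fun current _ => PySem.Set.ofList (residuals code current ++ residuals current code))
          (PySem.Set.ofList code) := by
  induction k with
  | zero => rfl
  | succ m ih =>
      rw [List.range_succ, List.foldl_append, ← ih]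
      simpa using stepA_eq code m

-- ===== VERDICT (by name: the statement is the Claim_ definition above) =====
theorem create_set_n_spec : Claim_equal_create_set_n := by
  intro code n _ _
  unfold Spec_create_set_n create_set_n create_set_n_alt
  exact levels_eq code n.toNat
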